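-- pv_equiv track=rewrite | github.com/Cynwell/Text-Level-GNN | train.py | create_neighbor_set
-- ===== SOURCE A (Python) =====
-- def create_neighbor_set(node_set, p=2):
--     if type(node_set[0]) != int:
--         raise ValueError('node_set should be a 1D list!')
--     if p < 0:
--         raise ValueError('p should be an integer >= 0!')
--     sequence_length = len(node_set)
--     neighbor_set = []
--     for i in range(sequence_length):
--         neighbor = []
--         for j in range(-p, p+1):
--             if 0 <= i + j < sequence_length:
--                 neighbor.append(node_set[i+j])
--         neighbor_set.append(neighbor)
--     return neighbor_set
-- ===== SOURCE B (Python) =====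
-- def create_neighbor_set(node_set, p=2):
--     if type(node_set[0]) != int:
--         raise ValueError('node_set should be a 1D list!')
--     if p < 0:
--         raise ValueError('p should be an integer >= 0!')
--     return [node_set[max(0, i - p):i + p + 1] for i in range(len(node_set))]
-- ===== Notes on version B (the rewrite author's own statement) =====
-- stated objective: simpler
-- what changed: Replaces the inner j-loop over range(-p,p+1) with per-bound tests by a single list slice node_set[max(0,i-p):i+p+1] inside one comprehension.
import Mathlib
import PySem

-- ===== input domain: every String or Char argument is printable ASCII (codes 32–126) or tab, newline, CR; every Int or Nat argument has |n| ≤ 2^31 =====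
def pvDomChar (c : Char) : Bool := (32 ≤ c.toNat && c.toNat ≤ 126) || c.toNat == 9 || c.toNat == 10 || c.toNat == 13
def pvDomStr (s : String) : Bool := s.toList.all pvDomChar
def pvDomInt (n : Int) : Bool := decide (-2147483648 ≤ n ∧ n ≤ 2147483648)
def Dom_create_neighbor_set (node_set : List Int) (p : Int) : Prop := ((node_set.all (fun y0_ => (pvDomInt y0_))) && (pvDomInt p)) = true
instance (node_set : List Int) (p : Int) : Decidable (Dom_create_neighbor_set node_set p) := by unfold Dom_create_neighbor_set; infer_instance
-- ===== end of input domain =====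

-- B replaces A's inner bounds-tested loop over range(-p, p+1) by a single slice node_set[max(0,i-p):i+p+1] per index (simpler; same cost).


-- ===== PORT A =====
def create_neighbor_set (node_set : List Int) (p : Int) : List (List Int) :=
  let n : Int := node_set.length
  (PySem.List.pyRange 0 n 1).foldl
    (fun acc i =>
      acc ++ [(PySem.List.pyRange (-p) (p + 1) 1).foldl
        (fun nb j =>
          if 0 ≤ i + j ∧ i + j < n then nb ++ [PySem.List.pyGetD node_set (i + j) 0] else nb) []])
    []

-- ===== PORT B =====
def create_neighbor_set_alt (node_set : List Int) (p : Int) : List (List Int) :=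
  (PySem.List.pyRange 0 (node_set.length : Int) 1).map
    (fun i => PySem.List.slice node_set (some (max 0 (i - p))) (some (i + p + 1)))

-- ===== PRECONDITION & SPEC =====
-- Pre_ excludes exactly the inputs on which A raises: the empty list (IndexError on node_set[0]) and p < 0 (ValueError).
def Pre_create_neighbor_set (node_set : List Int) (p : Int) : Prop := node_set ≠ [] ∧ 0 ≤ p
instance (node_set : List Int) (p : Int) : Decidable (Pre_create_neighbor_set node_set p) := by unfold Pre_create_neighbor_set; infer_instance
def pvWitness_create_neighbor_set : List Int × Int := ([3, 1, 4, 1, 5], 2)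
def Spec_create_neighbor_set (node_set : List Int) (p : Int) (out : List (List Int)) : Prop := out = create_neighbor_set_alt node_set p
instance (node_set : List Int) (p : Int) (out : List (List Int)) : Decidable (Spec_create_neighbor_set node_set p out) := by unfold Spec_create_neighbor_set; infer_instance

-- ===== CLAIM (what is proved, stated in full; the proofs are below) =====
def Claim_equal_create_neighbor_set : Prop := ∀ (node_set : List Int) (p : Int), Dom_create_neighbor_set node_set p → Pre_create_neighbor_set node_set p → Spec_create_neighbor_set node_set p (create_neighbor_set node_set p)

-- ===== LEMMAS AND PROOFS =====

lemma filter_pyRange_interval (c d : Int) :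
    ∀ (n : Nat) (a b : Int), (b - a).toNat = n →
      (PySem.List.pyRange a b 1).filter (fun j => decide (c ≤ j ∧ j < d))
        = PySem.List.pyRange (max a c) (min b d) 1 := by
  intro n
  induction n with
  | zero =>
    intro a b h
    rw [PySem.List.pyRange_one_eq_nil (by omega), PySem.List.pyRange_one_eq_nil (by omega)]
    rfl
  | succ m ih =>
    intro a b h
    rw [PySem.List.pyRange_one_cons (by omega)]
    rw [List.filter_cons]
    by_cases hc : c ≤ a ∧ a < d
    · simp only [hc, decide_true, and_self, if_true]
      rw [ih (a + 1) b (by omega)]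
      have h1 : max (a + 1) c = a + 1 := by omega
      have h2 : max a c = a := by omega
      rw [h1, h2]
      conv_rhs => rw [PySem.List.pyRange_one_cons (show a < min b d by omega)]
    · simp only [hc, decide_false, Bool.false_eq_true, if_false]
      rw [ih (a + 1) b (by omega)]
      rcases (not_and_or.mp hc) with h1 | h2
      · have : max (a + 1) c = max a c := by omega
        rw [this]
      · rw [PySem.List.pyRange_one_eq_nil (show min b d ≤ max (a + 1) c by omega),
            PySem.List.pyRange_one_eq_nil (show min b d ≤ max a c by omega)]

lemma inner_eq_slice (ns : List Int) (p i : Int) (hp : 0 ≤ p) (hi : 0 ≤ i)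
    (hin : i < (ns.length : Int)) :
    (PySem.List.pyRange (-p) (p + 1) 1).foldl
      (fun nb j =>
        if 0 ≤ i + j ∧ i + j < (ns.length : Int) then nb ++ [PySem.List.pyGetD ns (i + j) 0] else nb) []
      = PySem.List.slice ns (some (max 0 (i - p))) (some (i + p + 1)) := by
  rw [PySem.List.foldl_append_ite]
  rw [List.nil_append]
  have hfc : (fun j => decide (0 ≤ i + j ∧ i + j < (ns.length : Int)))
      = (fun j : Int => decide ((-i) ≤ j ∧ j < (ns.length : Int) - i)) := by
    funext j; simp only [decide_eq_decide]; omega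
  rw [hfc, filter_pyRange_interval (-i) ((ns.length : Int) - i) _ (-p) (p + 1) rfl]
  have ha : max 0 (i - p) = (((max 0 (i - p)).toNat : Nat) : Int) := by omega
  have hb : i + p + 1 = (((i + p + 1).toNat : Nat) : Int) := by omega
  rw [ha, hb, PySem.List.slice_natCast]
  apply List.ext_getElem
  · simp only [List.length_map, PySem.List.length_pyRange_one, List.length_take,
      List.length_drop]
    omega
  · intro k h1 h2
    simp only [List.getElem_map, PySem.List.getElem_pyRange_one, List.getElem_take,
      List.getElem_drop]
    have hk : k < (min (p + 1) ((ns.length : Int) - i) - max (-p) (-i)).toNat := by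
      simpa only [List.length_map, PySem.List.length_pyRange_one] using h1
    rw [PySem.List.pyGetD_eq_getElem _ _ (by omega) (by omega)]
    congr 1
    omega

-- ===== VERDICT (by name: the statement is the Claim_ definition above) =====
theorem create_neighbor_set_spec : Claim_equal_create_neighbor_set := by
  intro ns p _ hpre
  unfold Spec_create_neighbor_set create_neighbor_set create_neighbor_set_alt
  rw [PySem.List.foldl_append_singleton_eq_map, List.nil_append]
  apply List.map_congr_left
  intro i hi
  rw [PySem.List.mem_pyRange_one] at hi
  exact inner_eq_slice ns p i hpre.2 hi.1 hi.2
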